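-- pv_equiv track=rewrite | github.com/mariembm2005/mariembm2005 | tictactoe.py | lolj
-- ===== SOURCE A (Python) =====
-- def lolj(m,n):
--     c = 1
--     for i in range(3):
--         for j in range(3):
--             if(c==n):
--                 return j
--             else:
--                 c+=1
-- ===== SOURCE B (Python) =====
-- def lolj(m, n):
--     if 1 <= n <= 9:
--         return (n - 1) % 3
-- ===== Notes on version B (the rewrite author's own statement) =====
-- stated objective: simpler
-- what changed: Replaced the nested 3x3 counting loop and running counter with the closed form (n-1)%3 guarded by 1<=n<=9.
import Mathlib
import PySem

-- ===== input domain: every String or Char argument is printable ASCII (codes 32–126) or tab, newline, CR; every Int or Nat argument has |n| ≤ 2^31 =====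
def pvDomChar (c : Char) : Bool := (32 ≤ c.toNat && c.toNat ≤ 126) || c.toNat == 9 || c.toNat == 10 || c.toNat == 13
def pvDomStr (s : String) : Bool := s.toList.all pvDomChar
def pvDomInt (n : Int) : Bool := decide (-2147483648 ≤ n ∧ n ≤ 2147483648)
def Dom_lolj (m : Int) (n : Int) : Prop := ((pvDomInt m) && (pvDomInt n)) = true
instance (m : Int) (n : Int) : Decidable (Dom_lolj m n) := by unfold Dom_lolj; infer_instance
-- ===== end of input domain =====

-- B replaces A's nested 3x3 counting loop with the closed form (n-1) % 3 guarded by 1 <= n <= 9 (simpler).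

-- ===== PORT A =====
-- literal port: counter c starts at 1; nested loops over range(3); early return of j when c == n
def lolj (m : Int) (n : Int) : Option Int :=
  (((PySem.List.pyRange 0 3 1).foldl (fun st _i =>
      (PySem.List.pyRange 0 3 1).foldl (fun st j =>
        match st with
        | (some r, c) => (some r, c)
        | (none, c) => if c == n then (some j, c) else (none, c + 1)) st) ((none : Option Int), (1 : Int)))).1

-- ===== PORT B =====
def lolj_alt (m : Int) (n : Int) : Option Int :=
  if 1 ≤ n ∧ n ≤ 9 then some (PySem.Int.mod (n - 1) 3) else none

-- ===== PRECONDITION & SPEC =====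
def Spec_lolj (m : Int) (n : Int) (out : Option Int) : Prop := out = lolj_alt m n
instance (m : Int) (n : Int) (out : Option Int) : Decidable (Spec_lolj m n out) := by unfold Spec_lolj; infer_instance

-- ===== CLAIM (what is proved, stated in full; the proofs are below) =====
def Claim_equal_lolj : Prop := ∀ (m : Int) (n : Int), Dom_lolj m n → Spec_lolj m n (lolj m n)

-- ===== LEMMAS AND PROOFS =====

theorem pyRange013 : PySem.List.pyRange 0 3 1 = [0, 1, 2] := by
  rw [PySem.List.pyRange_one]; rfl

-- ===== VERDICT (by name: the statement is the Claim_ definition above) =====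
theorem lolj_spec : Claim_equal_lolj := by
  intro m n _
  unfold Spec_lolj lolj lolj_alt
  rw [pyRange013]
  simp only [List.foldl, beq_iff_eq]
  by_cases e1 : n = 1
  · subst e1; decide
  by_cases e2 : n = 2
  · subst e2; decide
  by_cases e3 : n = 3
  · subst e3; decide
  by_cases e4 : n = 4
  · subst e4; decide
  by_cases e5 : n = 5
  · subst e5; decide
  by_cases e6 : n = 6
  · subst e6; decide
  by_cases e7 : n = 7
  · subst e7; decide
  by_cases e8 : n = 8
  · subst e8; decide
  by_cases e9 : n = 9
  · subst e9; decide
  have c1 : ¬((1 : Int) = n) := by omega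
  have c2 : ¬((2 : Int) = n) := by omega
  have c3 : ¬((3 : Int) = n) := by omega
  have c4 : ¬((4 : Int) = n) := by omega
  have c5 : ¬((5 : Int) = n) := by omega
  have c6 : ¬((6 : Int) = n) := by omega
  have c7 : ¬((7 : Int) = n) := by omega
  have c8 : ¬((8 : Int) = n) := by omega
  have c9 : ¬((9 : Int) = n) := by omega
  have hne : ¬(1 ≤ n ∧ n ≤ 9) := by omega
  simp [c1, c2, c3, c4, c5, c6, c7, c8, c9, hne]
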